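-- pv_equiv track=rewrite | github.com/skytreader/programming_praxis | cryptography/double_transposition_cypher.py | compute_numeric_key
-- ===== SOURCE A (Python) =====
-- def compute_numeric_key(word):
-- 	"""
-- 	Computes the numeric key of the given string. The characters are
-- 	sorted and then each character in the original word is replaced
-- 	by it's position in the sorted sequence. If a letter is repeated,
-- 	it's numeric replacement should be increasing left to right.
--
-- 	This uses Python's sorted function to sort.
--
-- 	Returns a numeric string.
-- 	"""
-- 	sorted_word = sorted(word)
-- 	numkey = []
--
-- 	for letter in word:
-- 		occurence_index = sorted_word.index(letter)
-- 		numkey.append(str(occurence_index + 1))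
-- 		sorted_word[occurence_index] += " "
--
-- 	return "".join(numkey)
-- ===== SOURCE B (Python) =====
-- def compute_numeric_key(word):
-- 	"""
-- 	Closed-form rank computation: the k-th occurrence (left to right) of a
-- 	letter c gets rank (# letters smaller than c) + k + 1. The "smaller"
-- 	count is computed once per distinct letter and occurrences are tracked
-- 	in a running counter, so no sort, no scratch list and no rescans.
-- 	"""
-- 	seen = {}
-- 	smaller = {}
-- 	digits = []
-- 	for letter in word:
-- 		if letter not in smaller:
-- 			smaller[letter] = sum(1 for other in word if other < letter)
-- 		k = seen.get(letter, 0)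
-- 		seen[letter] = k + 1
-- 		digits.append(str(smaller[letter] + k + 1))
-- 	return "".join(digits)
-- ===== Notes on version B (the rewrite author's own statement) =====
-- stated objective: faster
-- what changed: Replaces the sort-then-repeated-linear-.index-with-in-place-space-marking scheme by a closed-form rank (1 + # smaller letters + # equal letters earlier), computing the smaller-count once per distinct letter and tracking occurrences in a running counter dict.
import Mathlib
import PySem

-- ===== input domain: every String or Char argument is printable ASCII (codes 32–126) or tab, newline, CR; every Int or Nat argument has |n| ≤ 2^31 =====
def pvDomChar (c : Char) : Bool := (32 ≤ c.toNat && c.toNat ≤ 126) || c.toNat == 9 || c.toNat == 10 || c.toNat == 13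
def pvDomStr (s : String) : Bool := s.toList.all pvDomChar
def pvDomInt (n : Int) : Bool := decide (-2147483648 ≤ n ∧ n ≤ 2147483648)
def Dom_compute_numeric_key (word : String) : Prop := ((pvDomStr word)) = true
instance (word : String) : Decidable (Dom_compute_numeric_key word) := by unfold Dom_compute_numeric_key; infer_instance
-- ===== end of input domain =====

-- B replaces A's sort + repeated linear `.index` + in-place space-marking by a closed-form rank
-- (1 + # smaller letters + # equal letters earlier); same cost class, no scratch list, no mutation.

-- ===== PORT A =====
-- One loop step of A: find the first unmarked copy of `letter` in the sorted scratch list,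
-- append its 1-based index to numkey, and mark that slot by appending a space to it.
-- (Python's mutable 1-char strings are modelled as `List Char`; `sorted(word)` is the list of
-- word's characters sorted, each a 1-char string. The `none` branch is Python's ValueError,
-- unreachable because every letter of word occurs in sorted(word) with a spare unmarked copy.)
def cnkStep (st : List (List Char) × List String) (letter : Char) :
    List (List Char) × List String :=
  match PySem.List.index? st.1 [letter] with
  | some i => (st.1.set i (st.1.getD i [] ++ [' ']),
               st.2 ++ [PySem.Int.toStr ((i : Int) + 1)])
  | none => st

def compute_numeric_key (word : String) : String :=
  let sorted_word : List (List Char) :=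
    (PySem.List.sorted word.toList (fun c => c)).map (fun c => [c])
  let st := word.toList.foldl cnkStep (sorted_word, [])
  PySem.Str.join "" st.2

-- ===== PORT B =====
-- One loop step of B over state (seen, smaller, digits): memoise the count of strictly
-- smaller letters for `letter`, read the running occurrence counter, and append the digit
-- str(smaller[letter] + k + 1).
def cnkAltStep (w : List Char)
    (st : PySem.Dict Char Int × PySem.Dict Char Int × List String) (letter : Char) :
    PySem.Dict Char Int × PySem.Dict Char Int × List String :=
  let smaller := if st.2.1.contains letter then st.2.1
    else st.2.1.insert letter ((w.map (fun other => if other < letter then (1 : Int) else 0)).sum)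
  let k := st.1.getD letter 0
  let seen := st.1.insert letter (k + 1)
  (seen, smaller, st.2.2 ++ [PySem.Int.toStr (smaller.getD letter 0 + k + 1)])

def compute_numeric_key_alt (word : String) : String :=
  let w := word.toList
  let st := w.foldl (cnkAltStep w) (PySem.Dict.empty, PySem.Dict.empty, [])
  PySem.Str.join "" st.2.2

-- ===== PRECONDITION & SPEC =====
def Spec_compute_numeric_key (word : String) (out : String) : Prop := out = compute_numeric_key_alt word
instance (word : String) (out : String) : Decidable (Spec_compute_numeric_key word out) := by unfold Spec_compute_numeric_key; infer_instance

-- ===== CLAIM (what is proved, stated in full; the proofs are below) =====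
def Claim_equal_compute_numeric_key : Prop := ∀ (word : String), Dom_compute_numeric_key word → Spec_compute_numeric_key word (compute_numeric_key word)

-- ===== LEMMAS AND PROOFS =====

-- A's scratch list after some iterations: the sorted characters `s`, where for each character c
-- the first `f c` copies of c are marked (carry a trailing space).
def cnkMark : List Char → (Char → Nat) → List (List Char)
  | [], _ => []
  | d :: t, f =>
      (if 0 < f d then [d, ' '] else [d]) :: cnkMark t (fun e => if e = d then f e - 1 else f e)

-- The list of digit strings B produces for suffix `suf` of w, when `p` is the part already done.
def cnkOut (w : List Char) : List Char → List Char → List String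
  | _, [] => []
  | p, c :: t =>
      PySem.Int.toStr (((w.countP (fun d => decide (d < c)) : Nat) : Int) + (p.count c : Nat) + 1)
        :: cnkOut w (p ++ [c]) t

theorem cnkMark_zero (s : List Char) : cnkMark s (fun _ => 0) = s.map (fun c => [c]) := by
  induction s with
  | nil => rfl
  | cons d t ih =>
      simp only [cnkMark, List.map]
      have : (fun e => if e = d then (0:Nat) - 1 else 0) = (fun _ => (0:Nat)) := by
        funext e; simp
      simp [ih]

theorem cnkMark_index (s : List Char) (f : Char → Nat) (c : Char)
    (hs : s.Pairwise (· ≤ ·)) (hf : f c < s.count c) :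
    PySem.List.index? (cnkMark s f) [c]
      = some (s.countP (fun d => decide (d < c)) + f c) := by
  induction s generalizing f with
  | nil => simp at hf
  | cons d t ih =>
      have hd := (List.pairwise_cons.mp hs).1
      have ht := (List.pairwise_cons.mp hs).2
      rcases lt_trichotomy d c with hlt | heq | hgt
      · -- d < c : head is not a copy of c
        have hhd : (if 0 < f d then [d, ' '] else [d]) ≠ [c] := by
          split <;> simp <;> intro h <;> exact absurd (h ▸ hlt) (lt_irrefl c)
        rw [cnkMark, PySem.List.index?_cons_of_ne _ hhd]
        have hfc : (fun e => if e = d then f e - 1 else f e) c = f c := by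
          simp [show c ≠ d by intro h; exact absurd (h ▸ hlt) (lt_irrefl c)]
        have hcnt : (d :: t).count c = t.count c := by
          simp [show d ≠ c from ne_of_lt hlt]
        rw [ih (fun e => if e = d then f e - 1 else f e) ht (by rw [hfc]; omega)]
        simp only [Option.map_some, hfc]
        congr 1
        have : (d :: t).countP (fun e => decide (e < c)) = t.countP (fun e => decide (e < c)) + 1 := by
          simp [hlt]
        omega
      · -- d = c
        subst heq
        have hcp : (d :: t).countP (fun e => decide (e < d)) = 0 := by
          apply List.countP_eq_zero.mpr
          intro a ha
          rcases List.mem_cons.mp ha with h | h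
          · simp [h]
          · simp [not_lt.mpr (hd a h)]
        by_cases hfd : 0 < f d
        · have hhd : ([d, ' '] : List Char) ≠ [d] := by simp
          rw [cnkMark, if_pos hfd, PySem.List.index?_cons_of_ne _ hhd]
          have hfc : (fun e => if e = d then f e - 1 else f e) d = f d - 1 := by simp
          have hcnt : (d :: t).count d = t.count d + 1 := by simp
          rw [ih (fun e => if e = d then f e - 1 else f e) ht (by rw [hfc]; omega)]
          simp only [Option.map_some]
          congr 1
          have hcp' : t.countP (fun e => decide (e < d)) = 0 := by
            apply List.countP_eq_zero.mpr
            intro a ha; simp [not_lt.mpr (hd a ha)]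
          split <;> simp_all <;> omega
        · rw [cnkMark, if_neg hfd]
          rw [PySem.List.index?_cons_self]
          congr 1
          omega
      · -- c < d : c does not occur at all, contradiction with hf
        exfalso
        have : (d :: t).count c = 0 := by
          apply List.count_eq_zero.mpr
          intro hmem
          rcases List.mem_cons.mp hmem with h | h
          · exact absurd (h ▸ hgt) (lt_irrefl c)
          · exact absurd ((hd c h).trans_lt' hgt) (lt_irrefl c)
        omega

theorem cnkMark_set (s : List Char) (f : Char → Nat) (c : Char)
    (hs : s.Pairwise (· ≤ ·)) (hf : f c < s.count c) :
    (cnkMark s f).set (s.countP (fun d => decide (d < c)) + f c)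
        ((cnkMark s f).getD (s.countP (fun d => decide (d < c)) + f c) [] ++ [' '])
      = cnkMark s (fun e => if e = c then f e + 1 else f e) := by
  induction s generalizing f with
  | nil => simp at hf
  | cons d t ih =>
      have hd := (List.pairwise_cons.mp hs).1
      have ht := (List.pairwise_cons.mp hs).2
      rcases lt_trichotomy d c with hlt | heq | hgt
      · -- d < c : index lands in the tail
        have hne : c ≠ d := by intro h; exact absurd (h ▸ hlt) (lt_irrefl c)
        have hcp : (d :: t).countP (fun e => decide (e < c))
            = t.countP (fun e => decide (e < c)) + 1 := by simp [hlt]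
        have hidx : (d :: t).countP (fun e => decide (e < c)) + f c
            = (t.countP (fun e => decide (e < c)) + f c) + 1 := by omega
        have hfc : (fun e => if e = d then f e - 1 else f e) c = f c := by simp [hne]
        have hcnt : (d :: t).count c = t.count c := by
          simp [show d ≠ c from ne_of_lt hlt]
        have ihs := ih (fun e => if e = d then f e - 1 else f e) ht (by rw [hfc]; omega)
        rw [cnkMark, hidx, List.set_cons_succ, List.getD_cons_succ]
        rw [show t.countP (fun e => decide (e < c)) + f c
              = t.countP (fun e => decide (e < c))
                + (fun e => if e = d then f e - 1 else f e) c from by rw [hfc]]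
        rw [ihs]
        have harg : (fun e => if e = c then (fun e => if e = d then f e - 1 else f e) e + 1
                        else (fun e => if e = d then f e - 1 else f e) e)
            = (fun e => if e = d then (fun e => if e = c then f e + 1 else f e) e - 1
                        else (fun e => if e = c then f e + 1 else f e) e) := by
          funext e
          by_cases h1 : e = c
          · subst h1; simp [hne]
          · by_cases h2 : e = d <;> simp [h1, h2, show d ≠ c from ne_of_lt hlt]
        have hhead : (if 0 < f d then [d, ' '] else [d])
            = (if 0 < (fun e => if e = c then f e + 1 else f e) d then [d, ' '] else [d]) := by
          simp [show d ≠ c from ne_of_lt hlt]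
        rw [cnkMark, ← harg, ← hhead]
      · -- d = c : index lands at position f c of the block of c's
        subst heq
        have hcp : (d :: t).countP (fun e => decide (e < d)) = 0 := by
          apply List.countP_eq_zero.mpr
          intro a ha
          rcases List.mem_cons.mp ha with h | h
          · simp [h]
          · simp [not_lt.mpr (hd a h)]
        by_cases hfd : 0 < f d
        · have hcp' : t.countP (fun e => decide (e < d)) = 0 := by
            apply List.countP_eq_zero.mpr
            intro a ha; simp [not_lt.mpr (hd a ha)]
          have hidx : (d :: t).countP (fun e => decide (e < d)) + f d = (f d - 1) + 1 := by omega
          have hfc : (fun e => if e = d then f e - 1 else f e) d = f d - 1 := by simp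
          have hcnt : (d :: t).count d = t.count d + 1 := by simp
          have ihs := ih (fun e => if e = d then f e - 1 else f e) ht (by rw [hfc]; omega)
          rw [cnkMark, if_pos hfd, hidx, List.set_cons_succ, List.getD_cons_succ]
          rw [show f d - 1 = t.countP (fun e => decide (e < d))
                + (fun e => if e = d then f e - 1 else f e) d from by rw [hfc]; omega]
          rw [ihs]
          have harg : (fun e => if e = d then (fun e => if e = d then f e - 1 else f e) e + 1
                          else (fun e => if e = d then f e - 1 else f e) e)
              = (fun e => if e = d then (fun e => if e = d then f e + 1 else f e) e - 1
                          else (fun e => if e = d then f e + 1 else f e) e) := by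
            funext e
            by_cases h2 : e = d <;> simp [h2] <;> omega
          have hhead : ([d, ' '] : List Char)
              = (if 0 < (fun e => if e = d then f e + 1 else f e) d then [d, ' '] else [d]) := by
            simp
          rw [cnkMark, ← harg, ← hhead]
        · have hidx : (d :: t).countP (fun e => decide (e < d)) + f d = 0 := by omega
          rw [cnkMark, if_neg hfd, hidx, List.set_cons_zero, List.getD_cons_zero]
          have harg : (fun e => if e = d then f e - 1 else f e)
              = (fun e => if e = d then (fun e => if e = d then f e + 1 else f e) e - 1
                          else (fun e => if e = d then f e + 1 else f e) e) := by
            funext e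
            by_cases h2 : e = d <;> simp [h2] <;> omega
          have hhead : ([d] ++ [' '] : List Char)
              = (if 0 < (fun e => if e = d then f e + 1 else f e) d then [d, ' '] else [d]) := by
            simp
          rw [cnkMark, ← harg, ← hhead]
      · -- c < d : impossible
        exfalso
        have : (d :: t).count c = 0 := by
          apply List.count_eq_zero.mpr
          intro hmem
          rcases List.mem_cons.mp hmem with h | h
          · exact absurd (h ▸ hgt) (lt_irrefl c)
          · exact absurd ((hd c h).trans_lt' hgt) (lt_irrefl c)
        omega

theorem cnkStep_some (sw : List (List Char)) (nk : List String) (letter : Char) (i : Nat)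
    (h : PySem.List.index? sw [letter] = some i) :
    cnkStep (sw, nk) letter
      = (sw.set i (sw.getD i [] ++ [' ']), nk ++ [PySem.Int.toStr ((i : Int) + 1)]) := by
  rw [cnkStep, h]

theorem cnk_loop (w s : List Char) (hs : s.Pairwise (· ≤ ·)) (hperm : s.Perm w) :
    ∀ (suf p : List Char) (acc : List String), w = p ++ suf →
      suf.foldl cnkStep (cnkMark s (fun c => p.count c), acc)
        = (cnkMark s (fun c => (p ++ suf).count c), acc ++ cnkOut w p suf) := by
  intro suf
  induction suf with
  | nil => intro p acc hw; simp [cnkOut]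
  | cons c t ih =>
      intro p acc hw
      have hf : p.count c < s.count c := by
        have hc : s.count c = w.count c := hperm.count_eq c
        rw [hc, hw]
        simp [List.count_append]
      have hpc : s.countP (fun d => decide (d < c)) = w.countP (fun d => decide (d < c)) :=
        hperm.countP_eq _
      have hidx : PySem.List.index? (cnkMark s (fun e => p.count e)) [c]
          = some (s.countP (fun d => decide (d < c)) + p.count c) :=
        cnkMark_index s (fun e => p.count e) c hs hf
      have hset : (cnkMark s (fun e => p.count e)).set
            (s.countP (fun d => decide (d < c)) + p.count c)
            ((cnkMark s (fun e => p.count e)).getD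
              (s.countP (fun d => decide (d < c)) + p.count c) [] ++ [' '])
          = cnkMark s (fun e => if e = c then p.count e + 1 else p.count e) :=
        cnkMark_set s (fun e => p.count e) c hs hf
      have hstep : cnkStep (cnkMark s (fun e => p.count e), acc) c
          = (cnkMark s (fun e => (p ++ [c]).count e),
             acc ++ [PySem.Int.toStr
               (((w.countP (fun d => decide (d < c)) : Nat) : Int) + (p.count c : Nat) + 1)]) := by
        rw [cnkStep_some _ _ _ _ hidx]
        refine congrArg₂ Prod.mk ?_ ?_
        · rw [hset]
          congr 1
          funext e
          by_cases h : e = c <;> simp [h, List.count_append, List.count_eq_zero]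
        · have : (((s.countP (fun d => decide (d < c)) + p.count c : Nat)) : Int) + 1
              = ((w.countP (fun d => decide (d < c)) : Nat) : Int) + ((p.count c : Nat) : Int) + 1 := by
            rw [hpc]; push_cast; ring
          rw [this]
      rw [List.foldl_cons, hstep,
          ih (p ++ [c]) _ (by rw [hw, List.append_cons])]
      rw [cnkOut]
      simp

theorem cnk_sum_smaller (w : List Char) (c : Char) :
    (w.map (fun other => if other < c then (1 : Int) else 0)).sum
      = ((w.countP (fun d => decide (d < c)) : Nat) : Int) := by
  rw [show (fun other => if other < c then (1 : Int) else 0)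
        = (fun other => if (fun d => decide (d < c)) other = true then (1 : Int) else 0)
      from by funext o; simp]
  exact PySem.List.sum_map_ite_one_zero _ w

theorem cnk_out_alt (w : List Char) :
    ∀ (suf p : List Char) (acc : List String) (seen smaller : PySem.Dict Char Int),
      w = p ++ suf →
      (∀ k, seen.getD k 0 = (p.count k : Int)) →
      (∀ k, smaller.contains k = true →
        smaller.getD k 0 = ((w.countP (fun d => decide (d < k)) : Nat) : Int)) →
      (suf.foldl (cnkAltStep w) (seen, smaller, acc)).2.2 = acc ++ cnkOut w p suf := by
  intro suf
  induction suf with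
  | nil => intro p acc seen smaller hw hseen hsm; simp [cnkOut]
  | cons c t ih =>
      intro p acc seen smaller hw hseen hsm
      rw [List.foldl_cons]
      -- the memo table after this step, and its invariant
      set smaller' := if smaller.contains c then smaller
        else smaller.insert c ((w.map (fun other => if other < c then (1 : Int) else 0)).sum)
        with hsm'def
      have hsm' : ∀ k, smaller'.contains k = true →
          smaller'.getD k 0 = ((w.countP (fun d => decide (d < k)) : Nat) : Int) := by
        intro k hk
        rw [hsm'def] at hk ⊢
        by_cases hc : smaller.contains c = true
        · rw [if_pos hc] at hk ⊢; exact hsm k hk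
        · rw [if_neg hc] at hk ⊢
          by_cases hkc : k = c
          · subst hkc
            rw [PySem.Dict.getD_insert_self, cnk_sum_smaller]
          · rw [PySem.Dict.getD_insert, if_neg hkc]
            rw [PySem.Dict.contains_insert] at hk
            exact hsm k (by simpa [hkc] using hk)
      have hsmc : smaller'.getD c 0 = ((w.countP (fun d => decide (d < c)) : Nat) : Int) := by
        apply hsm' c
        rw [hsm'def]
        by_cases hc : smaller.contains c = true
        · rw [if_pos hc]; exact hc
        · rw [if_neg hc]; exact PySem.Dict.contains_insert_self _ _ _
      have hstep : cnkAltStep w (seen, smaller, acc) c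
          = (seen.insert c ((p.count c : Int) + 1), smaller',
             acc ++ [PySem.Int.toStr
               (((w.countP (fun d => decide (d < c)) : Nat) : Int) + (p.count c : Nat) + 1)]) := by
        rw [cnkAltStep]
        simp only [← hsm'def, hseen c, hsmc]
      rw [hstep,
          ih (p ++ [c]) _ _ _ (by rw [hw, List.append_cons]) ?_ hsm']
      · rw [cnkOut]; simp
      · intro k
        rw [PySem.Dict.getD_insert]
        by_cases hkc : k = c
        · subst hkc; simp [List.count_append]
        · rw [if_neg hkc, hseen k]
          have h0 : List.count k [c] = 0 := by simp [List.count_eq_zero, hkc]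
          simp [List.count_append, h0]

-- ===== VERDICT (by name: the statement is the Claim_ definition above) =====
theorem compute_numeric_key_spec : Claim_equal_compute_numeric_key := by
  intro word _
  unfold Spec_compute_numeric_key compute_numeric_key compute_numeric_key_alt
  set w := word.toList with hw
  set s := PySem.List.sorted w (fun c => c) with hsdef
  have hs : s.Pairwise (· ≤ ·) := PySem.List.sorted_pairwise w (fun c => c)
  have hperm : s.Perm w := PySem.List.sorted_perm w (fun c => c) false
  have h0 : s.map (fun c => [c]) = cnkMark s (fun c => (([] : List Char)).count c) := by
    rw [show (fun c => (([] : List Char)).count c) = (fun _ => (0:Nat)) from by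
          funext c; simp, cnkMark_zero]
  have hA := cnk_loop w s hs hperm w [] [] (by simp)
  have hB := cnk_out_alt w w [] [] PySem.Dict.empty PySem.Dict.empty (by simp)
    (by intro k; simp [PySem.Dict.getD_empty])
    (by intro k hk; rw [PySem.Dict.contains_empty] at hk; cases hk)
  simp only [h0, hA, List.nil_append] at *
  rw [hB]
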